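-- pv_equiv track=rewrite | github.com/takapdayon/atcoder | python/_abc/AtCoderBeginnerContest057/C.py | fab
-- ===== SOURCE A (Python) =====
-- def fab(x):
--     if x == 1:
--         return x
--
--     ans = 0
--     for i in range(1 , x + 1):
--         if -(-x // i) < i:
--             return ans
--         if x % i == 0:
--             ans = len(str(int(x / i)))
-- ===== SOURCE B (Python) =====
-- def _isqrt(n):
--     # integer Newton iteration; n >= 1
--     x0 = n
--     x1 = (x0 + n // x0) // 2
--     while x1 < x0:
--         x0 = x1
--         x1 = (x0 + n // x0) // 2
--     return x0
--
--
-- def fab(x):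
--     if x <= 0:
--         return None
--     # scan downward from isqrt(x) for the largest divisor <= sqrt(x);
--     # the larger factor of that pair is the smallest possible, return its digit count
--     for i in range(_isqrt(x), 0, -1):
--         if x % i == 0:
--             return len(str(x // i))
-- ===== Notes on version B (the rewrite author's own statement) =====
-- stated objective: faster
-- what changed: Replaced A's upward scan from 1 with a ceiling-division stopping test and an overwritten accumulator by a Newton-iteration integer sqrt followed by a downward scan from isqrt(x) that returns at the first divisor found.
import Mathlib
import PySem

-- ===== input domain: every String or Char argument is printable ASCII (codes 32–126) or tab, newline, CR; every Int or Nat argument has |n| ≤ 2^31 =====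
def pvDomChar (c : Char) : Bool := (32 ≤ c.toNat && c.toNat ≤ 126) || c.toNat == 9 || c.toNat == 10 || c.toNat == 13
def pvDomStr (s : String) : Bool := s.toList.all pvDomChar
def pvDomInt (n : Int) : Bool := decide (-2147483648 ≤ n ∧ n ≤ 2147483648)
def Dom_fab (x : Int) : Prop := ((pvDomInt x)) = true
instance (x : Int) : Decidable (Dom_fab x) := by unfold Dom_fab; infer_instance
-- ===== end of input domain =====

-- B replaces A's upward divisor scan (ceil-division stop test + overwritten accumulator) by a
-- Newton-iteration integer square root followed by a downward scan from isqrt(x) that returns at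
-- the first divisor found (objective: alternative decomposition, faster on inputs with a divisor near √x).

-- ===== PORT A =====
-- the for-loop over range(1, x+1) with early returns, as structural recursion on the
-- remaining range length (fuel = number of range elements left); fuel 0 = range exhausted = fall
-- off the function end (None).
def fabLoop (x : Int) : Nat → Int → Int → Option Int
  | 0, _, _ => none
  | f + 1, i, ans =>
    if -(PySem.Int.floordiv (-x) i) < i then some ans
    else fabLoop x f (i + 1)
      (if PySem.Int.mod x i = 0
       then PySem.Str.len (PySem.Int.toStr (PySem.Int.truncdiv x i))  -- int(x / i): exact on Dom (|x| ≤ 2^31 < 2^53)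
       else ans)

def fab (x : Int) : Option Int :=
  if x = 1 then some x else fabLoop x (x + 1 - 1).toNat 1 0

-- ===== PORT B =====
-- _isqrt's while loop; fuel bounds the iteration count (x0 strictly decreases each round,
-- so n.toNat fuel is always enough for the calls B makes; fuel 0 returns x0 like a failed test).
def isqrtLoop (n : Int) : Nat → Int → Int
  | 0, x0 => x0
  | f + 1, x0 =>
    if PySem.Int.floordiv (x0 + PySem.Int.floordiv n x0) 2 < x0 then
      isqrtLoop n f (PySem.Int.floordiv (x0 + PySem.Int.floordiv n x0) 2)
    else x0

def isqrtNewton (n : Int) : Int := isqrtLoop n n.toNat n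

-- the for-loop over range(r, 0, -1) with an early return; fuel = r.toNat = range length.
def fabAltLoop (x : Int) : Nat → Int → Option Int
  | 0, _ => none
  | f + 1, i =>
    if PySem.Int.mod x i = 0 then
      some (PySem.Str.len (PySem.Int.toStr (PySem.Int.floordiv x i)))
    else fabAltLoop x f (i - 1)

def fab_alt (x : Int) : Option Int :=
  if x ≤ 0 then none
  else fabAltLoop x (isqrtNewton x).toNat (isqrtNewton x)

-- ===== PRECONDITION & SPEC =====
def Spec_fab (x : Int) (out : Option Int) : Prop := out = fab_alt x
instance (x : Int) (out : Option Int) : Decidable (Spec_fab x out) := by unfold Spec_fab; infer_instance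

-- ===== CLAIM (what is proved, stated in full; the proofs are below) =====
def Claim_equal_fab : Prop := ∀ (x : Int), Dom_fab x → Spec_fab x (fab x)

-- ===== LEMMAS AND PROOFS =====

-- the digit count of x // d, the common value both loops return
def dig (x d : Int) : Int := PySem.Str.len (PySem.Int.toStr (PySem.Int.floordiv x d))

-- the largest divisor of x not exceeding k
def bestDiv (x : Int) (k : Nat) : Nat := Nat.findGreatest (· ∣ x.toNat) k

lemma trunc_eq_floor (x d : Int) (hx : 0 ≤ x) (hd : 0 < d) :
    PySem.Int.truncdiv x d = PySem.Int.floordiv x d := by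
  show x.tdiv d = x.fdiv d
  rw [Int.tdiv_eq_ediv, Int.fdiv_eq_ediv, if_pos (Or.inl hx), if_pos (Or.inl hd.le)]
  ring

lemma ceil_lt_iff (x i : Int) (hi : 0 < i) :
    (-(PySem.Int.floordiv (-x) i) < i) ↔ x ≤ i * (i - 1) := by
  constructor
  · intro h
    have h1 : -i + 1 ≤ PySem.Int.floordiv (-x) i := by omega
    have := (PySem.Int.le_floordiv_iff_mul_le (a := -x) (b := i) (q := -i + 1) hi).1 h1
    nlinarith
  · intro h
    have h1 : (-i + 1) * i ≤ -x := by nlinarith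
    have := (PySem.Int.le_floordiv_iff_mul_le (a := -x) (b := i) (q := -i + 1) hi).2 h1
    omega

lemma int_dvd_iff_toNat (x i : Int) (hx : 0 ≤ x) (hi : 0 ≤ i) :
    i ∣ x ↔ i.toNat ∣ x.toNat := by
  rw [← Int.toNat_of_nonneg hx, ← Int.toNat_of_nonneg hi, Int.natCast_dvd_natCast]
  simp [Int.toNat_of_nonneg hx, Int.toNat_of_nonneg hi]

lemma div_gt_sqrt (n d : Nat) (_hn : 1 ≤ n) (hd : d ∣ n) (h : Nat.sqrt n < d) :
    n ≤ d * (d - 1) := by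
  have hd1 : 1 ≤ d := by
    rcases Nat.eq_zero_or_pos d with h0 | h1
    · subst h0; simp at hd; omega
    · exact h1
  have hdd : n < d * d := by
    have := (Nat.sqrt_lt' (m := n) (n := d)).1 h
    nlinarith [this]
  set e := n / d with he
  have hne : n = d * e := (Nat.mul_div_cancel' hd).symm
  have hed : e < d := by nlinarith
  have : e ≤ d - 1 := by omega
  calc n = d * e := hne
    _ ≤ d * (d - 1) := Nat.mul_le_mul_left d this

-- square root facts, Int-cast
lemma sqrt_facts (x : Int) (hx : 1 ≤ x) :
    1 ≤ (Nat.sqrt x.toNat : Int) ∧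
    (Nat.sqrt x.toNat : Int) * (Nat.sqrt x.toNat : Int) ≤ x ∧
    x < ((Nat.sqrt x.toNat : Int) + 1) * ((Nat.sqrt x.toNat : Int) + 1) := by
  have hxn : ((x.toNat : Int)) = x := Int.toNat_of_nonneg (by omega)
  have h1 : 1 ≤ Nat.sqrt x.toNat := by
    rw [Nat.le_sqrt]; omega
  have h2 : Nat.sqrt x.toNat * Nat.sqrt x.toNat ≤ x.toNat := by
    have := Nat.sqrt_le' x.toNat; nlinarith [this]
  have h3 : x.toNat < (Nat.sqrt x.toNat + 1) * (Nat.sqrt x.toNat + 1) := by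
    have := Nat.lt_succ_sqrt' x.toNat; nlinarith [this]
  refine ⟨by exact_mod_cast h1, ?_, ?_⟩
  · calc ((Nat.sqrt x.toNat : Int)) * (Nat.sqrt x.toNat : Int)
        = ((Nat.sqrt x.toNat * Nat.sqrt x.toNat : Nat) : Int) := by push_cast; ring
      _ ≤ ((x.toNat : Int)) := by exact_mod_cast h2
      _ = x := hxn
  · calc x = ((x.toNat : Int)) := hxn.symm
      _ < (((Nat.sqrt x.toNat + 1) * (Nat.sqrt x.toNat + 1) : Nat) : Int) := by exact_mod_cast h3
      _ = ((Nat.sqrt x.toNat : Int) + 1) * ((Nat.sqrt x.toNat : Int) + 1) := by push_cast; ring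

-- ===== Newton isqrt correctness =====
lemma newton_step_ge (x y : Int) (hx : 1 ≤ x) (hy : 1 ≤ y) :
    (Nat.sqrt x.toNat : Int) ≤ PySem.Int.floordiv (y + PySem.Int.floordiv x y) 2 := by
  obtain ⟨hs1, hs2, _⟩ := sqrt_facts x hx
  set s : Int := (Nat.sqrt x.toNat : Int) with hs
  have hfd : 2 * s - y ≤ PySem.Int.floordiv x y := by
    rcases le_or_gt (2 * s - y) 0 with h | h
    · have : (0 : Int) ≤ PySem.Int.floordiv x y :=
        (PySem.Int.le_floordiv_iff_mul_le (by omega)).2 (by nlinarith)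
      omega
    · exact (PySem.Int.le_floordiv_iff_mul_le (by omega)).2 (by nlinarith [sq_nonneg (y - s)])
  exact (PySem.Int.le_floordiv_iff_mul_le (by omega)).2 (by omega)

lemma isqrtLoop_eq (x : Int) (hx : 1 ≤ x) :
    ∀ (f : Nat) (y : Int), (Nat.sqrt x.toNat : Int) ≤ y → y ≤ (f : Int) + (Nat.sqrt x.toNat : Int) →
      isqrtLoop x f y = (Nat.sqrt x.toNat : Int) := by
  obtain ⟨hs1, hs2, _⟩ := sqrt_facts x hx
  intro f
  induction f with
  | zero => intro y h1 h2; simp [isqrtLoop]; omega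
  | succ f ih =>
    intro y h1 h2
    have hy1 : 1 ≤ y := by omega
    rw [isqrtLoop]
    set x1 := PySem.Int.floordiv (y + PySem.Int.floordiv x y) 2 with hx1
    have hge : (Nat.sqrt x.toNat : Int) ≤ x1 := newton_step_ge x y hx hy1
    split
    · exact ih x1 hge (by omega)
    · -- y ≤ x1: then y*y ≤ x, so y ≤ sqrt, hence y = sqrt
      rename_i hnl
      push_neg at hnl
      have h2y : y * 2 ≤ y + PySem.Int.floordiv x y :=
        (PySem.Int.le_floordiv_iff_mul_le (by omega)).1 hnl
      have hyfd : y ≤ PySem.Int.floordiv x y := by omega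
      have hyy : y * y ≤ x := (PySem.Int.le_floordiv_iff_mul_le (by omega)).1 hyfd
      have hle : y ≤ (Nat.sqrt x.toNat : Int) := by
        have hyn : ((y.toNat : Int)) = y := Int.toNat_of_nonneg (by omega)
        have hxn : ((x.toNat : Int)) = x := Int.toNat_of_nonneg (by omega)
        have hnat : y.toNat * y.toNat ≤ x.toNat := by
          have : ((y.toNat * y.toNat : Nat) : Int) ≤ ((x.toNat : Nat) : Int) := by
            push_cast [hyn, hxn]; nlinarith
          exact_mod_cast this
        have := Nat.le_sqrt.2 hnat
        calc y = ((y.toNat : Int)) := hyn.symm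
          _ ≤ (Nat.sqrt x.toNat : Int) := by exact_mod_cast this
      omega

lemma isqrtNewton_eq (x : Int) (hx : 1 ≤ x) :
    isqrtNewton x = (Nat.sqrt x.toNat : Int) := by
  obtain ⟨hs1, _, _⟩ := sqrt_facts x hx
  have hxn : ((x.toNat : Int)) = x := Int.toNat_of_nonneg (by omega)
  have hsx : (Nat.sqrt x.toNat : Int) ≤ x := by
    have := Nat.sqrt_le_self x.toNat
    calc (Nat.sqrt x.toNat : Int) ≤ ((x.toNat : Int)) := by exact_mod_cast this
      _ = x := hxn
  exact isqrtLoop_eq x hx x.toNat x hsx (by omega)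

-- ===== B loop characterisation =====
lemma fabAltLoop_eq (x : Int) (hx : 1 ≤ x) :
    ∀ k : Nat, 1 ≤ k → fabAltLoop x k (k : Int) = some (dig x (bestDiv x k : Int)) := by
  intro k
  induction k with
  | zero => omega
  | succ m ih =>
    intro _
    rw [fabAltLoop]
    have hdvd : PySem.Int.mod x ((m + 1 : Nat) : Int) = 0 ↔ (m + 1) ∣ x.toNat := by
      rw [PySem.Int.mod_eq_zero_iff_dvd,
          int_dvd_iff_toNat x ((m + 1 : Nat) : Int) (by omega) (by positivity)]
      simp
    by_cases h : (m + 1) ∣ x.toNat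
    · rw [if_pos (hdvd.2 h)]
      unfold bestDiv
      rw [Nat.findGreatest_succ, if_pos h]
      rfl
    · rw [if_neg (fun hc => h (hdvd.1 hc))]
      have hm : 1 ≤ m := by
        by_contra hm0
        have : m = 0 := by omega
        subst this
        exact h (one_dvd _)
      have hcast : ((m + 1 : Nat) : Int) - 1 = (m : Int) := by push_cast; ring
      rw [hcast, ih hm]
      unfold bestDiv
      rw [Nat.findGreatest_succ, if_neg h]

-- ===== A loop characterisation =====
-- accumulator invariant: when the loop is about to process i (2 ≤ i, all j < i already
-- processed, i.e. (i-1)*(i-2) < x), the accumulator is dig x (bestDiv x (i-1)) and the loop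
-- returns dig x (bestDiv x (sqrt x)).
lemma fabLoop_eq (x : Int) (hx : 2 ≤ x) :
    ∀ (g : Nat) (i : Int), ((Nat.sqrt x.toNat : Int) + 2 - i).toNat ≤ g → 2 ≤ i →
      (i - 1) * (i - 2) < x →
      fabLoop x (x + 1 - i).toNat i (dig x (bestDiv x (i - 1).toNat : Int)) =
        some (dig x (bestDiv x (Nat.sqrt x.toNat) : Int)) := by
  obtain ⟨hs1, hs2, hs3⟩ := sqrt_facts x (by omega)
  set s : Int := (Nat.sqrt x.toNat : Int) with hsdef
  have hsnat : s.toNat = Nat.sqrt x.toNat := by simp [hsdef]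
  -- shared fact: if the return test fires at i, the accumulator already holds the answer
  have ans_done : ∀ i : Int, 2 ≤ i → (i - 1) * (i - 2) < x → x ≤ i * (i - 1) →
      bestDiv x (i - 1).toNat = bestDiv x (Nat.sqrt x.toNat) := by
    intro i hi2 hlt hle
    have hige : s ≤ i - 1 := by
      by_contra hc
      push_neg at hc
      have : i ≤ s := by omega
      nlinarith
    have hile : i - 1 ≤ s + 1 := by
      by_contra hc
      push_neg at hc
      nlinarith
    rcases (by omega : i - 1 = s ∨ i - 1 = s + 1) with he | he
    · have : (i - 1).toNat = Nat.sqrt x.toNat := by omega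
      rw [this]
    · have hnd : ¬ (Nat.sqrt x.toNat + 1) ∣ x.toNat := by
        intro hdvd
        have hcast : ((x.toNat : Int)) = x := Int.toNat_of_nonneg (by omega)
        have hnat : x.toNat ≤ (Nat.sqrt x.toNat + 1) * Nat.sqrt x.toNat := by
          have h := div_gt_sqrt x.toNat (Nat.sqrt x.toNat + 1) (by omega) hdvd (by omega)
          simpa using h
        have hint : x ≤ (s + 1) * s := by
          calc x = ((x.toNat : Int)) := hcast.symm
            _ ≤ (((Nat.sqrt x.toNat + 1) * Nat.sqrt x.toNat : Nat) : Int) := by exact_mod_cast hnat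
            _ = (s + 1) * s := by push_cast; ring
        nlinarith
      have : (i - 1).toNat = Nat.sqrt x.toNat + 1 := by omega
      rw [this]
      unfold bestDiv
      rw [Nat.findGreatest_succ, if_neg hnd]
  intro g
  induction g with
  | zero =>
    intro i hfuel hi2 hlt
    -- fuel bound forces i ≥ s + 2, and then the return test fires immediately
    have hige : s + 2 ≤ i := by omega
    have hret : x ≤ i * (i - 1) := by nlinarith
    have hix : i ≤ x := by nlinarith
    have hsplit : (x + 1 - i).toNat = (x + 1 - (i + 1)).toNat + 1 := by omega
    rw [hsplit, fabLoop, if_pos ((ceil_lt_iff x i (by omega)).2 hret), ans_done i hi2 hlt hret]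
  | succ g ih =>
    intro i hfuel hi2 hlt
    have hix : i ≤ x := by nlinarith
    have hsplit : (x + 1 - i).toNat = (x + 1 - (i + 1)).toNat + 1 := by omega
    rw [hsplit, fabLoop]
    by_cases hret : x ≤ i * (i - 1)
    · rw [if_pos ((ceil_lt_iff x i (by omega)).2 hret), ans_done i hi2 hlt hret]
    · rw [if_neg (fun hc => hret ((ceil_lt_iff x i (by omega)).1 hc))]
      push_neg at hret
      have hisle : i ≤ s + 1 := by
        by_contra hc
        push_neg at hc
        nlinarith
      have hdvd : PySem.Int.mod x i = 0 ↔ i.toNat ∣ x.toNat := by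
        rw [PySem.Int.mod_eq_zero_iff_dvd, int_dvd_iff_toNat x i (by omega) (by omega)]
      have hit : i.toNat = (i - 1).toNat + 1 := by omega
      have hacc :
          (if PySem.Int.mod x i = 0
           then PySem.Str.len (PySem.Int.toStr (PySem.Int.truncdiv x i))
           else dig x (bestDiv x (i - 1).toNat : Int)) = dig x (bestDiv x i.toNat : Int) := by
        by_cases hd : i.toNat ∣ x.toNat
        · rw [if_pos (hdvd.2 hd), hit]
          unfold bestDiv
          rw [Nat.findGreatest_succ, if_pos (by rw [← hit]; exact hd)]
          have hcast : (((i - 1).toNat + 1 : Nat) : Int) = i := by push_cast; omega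
          rw [hcast, trunc_eq_floor x i (by omega) (by omega)]
          rfl
        · rw [if_neg (fun hc => hd (hdvd.1 hc)), hit]
          unfold bestDiv
          rw [Nat.findGreatest_succ, if_neg (by rw [← hit]; exact hd)]
      rw [hacc]
      have hi1 : i + 1 - 1 = i := by ring
      have := ih (i + 1) (by omega) (by omega) (by nlinarith)
      rw [hi1] at this
      rwa [hit] at this ⊢

-- ===== VERDICT (by name: the statement is the Claim_ definition above) =====
theorem fab_spec : Claim_equal_fab := by
  intro x _
  unfold Spec_fab
  by_cases hx1 : x = 1
  · subst hx1; decide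
  · by_cases hx0 : x ≤ 0
    · have h0 : (x + 1 - 1).toNat = 0 := by omega
      rw [fab, fab_alt, if_neg hx1, if_pos hx0, h0]
      rfl
    · have hx2 : 2 ≤ x := by omega
      obtain ⟨hs1, hs2, hs3⟩ := sqrt_facts x (by omega)
      have hA : fab x = some (dig x (bestDiv x (Nat.sqrt x.toNat) : Int)) := by
        rw [fab, if_neg hx1]
        have hf : (x + 1 - 1).toNat = (x + 1 - 2).toNat + 1 := by omega
        rw [hf, fabLoop]
        have hc1 : ¬ (-(PySem.Int.floordiv (-x) 1) < 1) := by
          rw [ceil_lt_iff x 1 (by omega)]; omega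
        have hm1 : PySem.Int.mod x 1 = 0 := (PySem.Int.mod_eq_zero_iff_dvd x 1).2 (one_dvd x)
        rw [if_neg hc1, if_pos hm1, trunc_eq_floor x 1 (by omega) (by omega)]
        have hacc : PySem.Str.len (PySem.Int.toStr (PySem.Int.floordiv x 1)) =
            dig x (bestDiv x ((2 : Int) - 1).toNat : Int) := by
          have h1 : ((2 : Int) - 1).toNat = 1 := by omega
          have hb : bestDiv x 1 = 1 := by
            unfold bestDiv
            simp
          rw [h1, hb]
          rfl
        rw [hacc, (by norm_num : (1 : Int) + 1 = 2)]
        exact fabLoop_eq x hx2 ((Nat.sqrt x.toNat : Int) + 2 - 2).toNat 2 (by omega) (by omega)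
          (by nlinarith)
      have hB : fab_alt x = some (dig x (bestDiv x (Nat.sqrt x.toNat) : Int)) := by
        rw [fab_alt, if_neg hx0, isqrtNewton_eq x (by omega), Int.toNat_natCast]
        exact fabAltLoop_eq x (by omega) (Nat.sqrt x.toNat) (by exact_mod_cast hs1)
      rw [hA, hB]
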